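-- pv_equiv track=rewrite | github.com/RiddleHe/vlm-as-formalizer | src/eval/find_goal.py | parse_objects_typed_list
-- ===== SOURCE A (Python) =====
-- def parse_objects_typed_list(seq):
--     out = {}
--     buffer = []
--     i = 0
--     while i < len(seq):
--         token = seq[i]
--         if token == '-':
--             if not buffer:
--                 raise ValueError("Found '-' without a collected object name.")
--             i += 1
--             if i >= len(seq):
--                 raise ValueError("Expected type after '-'.")
--
--             parent = seq[i]
--             i += 1
--             for t in buffer:
--                 out[t] = parent
--             buffer = []
--
--         else:
--             buffer.append(token)
--             i += 1
--
--     for name in buffer: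
--         out[name] = "object"
--     return out
-- ===== SOURCE B (Python) =====
-- def parse_objects_typed_list(seq):
--     out = {}
--     rest = seq
--     while '-' in rest:
--         j = rest.index('-')
--         if j == 0:
--             raise ValueError("Found '-' without a collected object name.")
--         if j + 1 == len(rest):
--             raise ValueError("Expected type after '-'.")
--         typ = rest[j + 1]
--         out.update((name, typ) for name in rest[:j])
--         rest = rest[j + 2:]
--     out.update((name, "object") for name in rest)
--     return out
-- ===== Notes on version B (the rewrite author's own statement) =====
-- stated objective: alternative
-- what changed: A walks token by token with an index and a mutable buffer of pending names; B repeatedly finds the next '-' with list.index, reads the type right after it, bulk-updates the dict from the name slice and continues on the slice past the type (no per-token buffer), raising the same two ValueErrors with the same precedence.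
import Mathlib
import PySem

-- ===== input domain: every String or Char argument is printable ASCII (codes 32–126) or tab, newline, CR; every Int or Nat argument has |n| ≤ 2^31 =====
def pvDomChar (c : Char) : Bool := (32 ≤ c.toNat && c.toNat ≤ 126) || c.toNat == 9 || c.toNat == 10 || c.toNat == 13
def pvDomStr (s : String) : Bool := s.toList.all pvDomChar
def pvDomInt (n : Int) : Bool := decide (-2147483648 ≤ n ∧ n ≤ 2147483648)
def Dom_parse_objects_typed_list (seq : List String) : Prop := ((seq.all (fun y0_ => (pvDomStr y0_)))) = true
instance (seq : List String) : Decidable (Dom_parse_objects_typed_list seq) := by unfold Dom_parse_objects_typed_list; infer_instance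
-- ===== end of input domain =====

-- B replaces A's token-by-token while-loop with a buffer by repeated `index('-')` + slice chunking
-- (objective: alternative decomposition); return-value equivalence proved on all non-raising inputs.


-- ===== PORT A =====
-- A's while-loop over index i, carried as the suffix `rest = seq[i:]` with the running dict
-- `out` and the collected-names `buffer`.  The two `raise ValueError` branches return the
-- dict built so far (those inputs lie outside Pre_).
def pvA_loop (rest : List String) (out : PySem.Dict String String) (buffer : List String) :
    List (String × String) :=
  match rest with
  | [] => (buffer.foldl (fun o name => o.insert name "object") out).items
  | token :: rest' =>
    if token = "-" then
      if buffer = [] then out.items          -- raise ValueError("Found '-' without a collected object name.")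
      else
        match rest' with
        | [] => out.items                    -- raise ValueError("Expected type after '-'.")
        | parent :: rest'' =>
            pvA_loop rest'' (buffer.foldl (fun o t => o.insert t parent) out) []
    else pvA_loop rest' out (buffer ++ [token])

def parse_objects_typed_list (seq : List String) : List (String × String) :=
  pvA_loop seq PySem.Dict.empty []

-- ===== PORT B =====
-- B's while-loop: find the first '-' with .index, read the type right after it, update the
-- dict with the whole name chunk at once, and continue on the slice past the type.
def pvB_loop (rest : List String) (out : PySem.Dict String String) :
    List (String × String) :=
  match h : PySem.List.index? rest "-" with
  | none => (out.update (rest.map (fun name => (name, "object")))).items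
  | some j =>
    if j = 0 then out.items                  -- raise ValueError("Found '-' without a collected object name.")
    else if (j : Int) + 1 = PySem.List.len rest then out.items  -- raise ValueError("Expected type after '-'.")
    else
      let typ := PySem.List.pyGetD rest ((j : Int) + 1) ""
      pvB_loop (PySem.List.slice rest (some ((j : Int) + 2)) none)
        (out.update ((PySem.List.slice rest none (some (j : Int))).map (fun name => (name, typ))))
  termination_by rest.length
  decreasing_by
    have hmem : "-" ∈ rest := (PySem.List.index?_isSome_iff rest "-").1 (by rw [h]; rfl)
    have : PySem.List.slice rest (some ((j : Int) + 2)) none = rest.drop (j + 2) := by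
      have := PySem.List.slice_from rest (a := (j : Int) + 2) (by positivity)
      simpa using this
    rw [this]
    have hpos : 0 < rest.length := List.length_pos_of_mem hmem
    simp [List.length_drop]
    omega

def parse_objects_typed_list_alt (seq : List String) : List (String × String) :=
  pvB_loop seq PySem.Dict.empty

-- ===== PRECONDITION & SPEC =====
-- Grammar check for the inputs on which the Python A returns (no ValueError):
-- seq must match  ( name+ '-' type )* name*  where a name is any token ≠ '-' and a type is
-- any token at all.  The flag records whether at least one name has been collected.
def pvWF (hasName : Bool) : List String → Bool
  | [] => true
  | t :: rest =>
    if t = "-" then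
      hasName && (match rest with | [] => false | _ :: r => pvWF false r)
    else pvWF true rest

def Pre_parse_objects_typed_list (seq : List String) : Prop := pvWF false seq = true
instance (seq : List String) : Decidable (Pre_parse_objects_typed_list seq) := by
  unfold Pre_parse_objects_typed_list; infer_instance

def pvWitness_parse_objects_typed_list : List String := ["a", "b", "-", "car", "c"]

def Spec_parse_objects_typed_list (seq : List String) (out : List (String × String)) : Prop :=
  out = parse_objects_typed_list_alt seq
instance (seq : List String) (out : List (String × String)) :
    Decidable (Spec_parse_objects_typed_list seq out) := by
  unfold Spec_parse_objects_typed_list; infer_instance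

-- ===== CLAIM (what is proved, stated in full; the proofs are below) =====
def Claim_equal_parse_objects_typed_list : Prop :=
  ∀ (seq : List String), Dom_parse_objects_typed_list seq →
    Pre_parse_objects_typed_list seq →
    Spec_parse_objects_typed_list seq (parse_objects_typed_list seq)

-- ===== LEMMAS AND PROOFS =====

-- definitional unfoldings of the two recursors
theorem pvA_loop_cons (token : String) (rest' : List String)
    (out : PySem.Dict String String) (buffer : List String) :
    pvA_loop (token :: rest') out buffer =
      (if token = "-" then
        if buffer = [] then out.items
        else
          match rest' with
          | [] => out.items
          | parent :: rest'' =>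
              pvA_loop rest'' (buffer.foldl (fun o t => o.insert t parent) out) []
      else pvA_loop rest' out (buffer ++ [token])) := by rw [pvA_loop.eq_def]

theorem pvWF_cons (b : Bool) (t : String) (rest : List String) :
    pvWF b (t :: rest) =
      (if t = "-" then b && (match rest with | [] => false | _ :: r => pvWF false r)
       else pvWF true rest) := by rw [pvWF.eq_def]

-- A's loop just moves a run of non-'-' tokens into the buffer.
theorem pvA_loop_names (names : List String) (hn : "-" ∉ names) :
    ∀ (rest : List String) (out : PySem.Dict String String) (buffer : List String),
      pvA_loop (names ++ rest) out buffer = pvA_loop rest out (buffer ++ names) := by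
  induction names with
  | nil => intro rest out buffer; simp
  | cons n ns ih =>
      intro rest out buffer
      have hne : ¬ n = "-" := fun hc => hn (by simp [hc])
      rw [List.cons_append, pvA_loop_cons, if_neg hne,
        ih (fun hc => hn (by simp [hc]))]
      simp

-- pvWF across a decomposition at the first '-'.
theorem pvWF_split (pre : List String) (hn : "-" ∉ pre) (b : Bool) (suf : List String) :
    pvWF b (pre ++ "-" :: suf) =
      ((b || !pre.isEmpty) && (match suf with | [] => false | _ :: r => pvWF false r)) := by
  induction pre generalizing b with
  | nil => rw [List.nil_append, pvWF_cons, if_pos rfl]; simp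
  | cons p ps ih =>
      have hne : ¬ p = "-" := fun hc => hn (by simp [hc])
      rw [List.cons_append, pvWF_cons, if_neg hne, ih (fun hc => hn (by simp [hc])) true]
      simp

-- Main invariant: on well-formed suffixes the two loops agree from any dict.
theorem pv_loops_agree : ∀ (n : Nat) (rest : List String), rest.length = n →
    ∀ (out : PySem.Dict String String), pvWF false rest = true →
      pvA_loop rest out [] = pvB_loop rest out := by
  intro n
  induction n using Nat.strong_induction_on with
  | _ n IH =>
  intro rest hlen out hwf
  match hidx : PySem.List.index? rest "-" with
  | none =>
      have hnm : "-" ∉ rest := (PySem.List.index?_eq_none_iff rest "-").1 hidx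
      have h1 := pvA_loop_names rest hnm [] out []
      simp only [List.append_nil] at h1
      rw [h1, pvB_loop, hidx]
      simp [pvA_loop, PySem.Dict.update, List.foldl_map]
  | some j =>
      obtain ⟨pre, suf, hdecomp, hjlen, hnm⟩ :=
        (PySem.List.index?_eq_some_iff rest "-" j).1 hidx
      rw [hdecomp, pvWF_split pre hnm false suf] at hwf
      simp only [Bool.false_or, Bool.and_eq_true] at hwf
      obtain ⟨hpreB, hsuf⟩ := hwf
      have hpre : pre ≠ [] := by
        intro hc; rw [hc] at hpreB; simp at hpreB
      match suf, hsuf with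
      | ty :: rest3, hrest3 =>
      -- A side: consume pre, then the separator and the type.
      have hA : pvA_loop rest out [] =
          pvA_loop rest3 (pre.foldl (fun o t => o.insert t ty) out) [] := by
        rw [hdecomp, pvA_loop_names pre hnm ("-" :: ty :: rest3) out [],
          List.nil_append, pvA_loop_cons, if_pos rfl, if_neg hpre]
      -- B side: one chunk step.
      have hlenrest : rest.length = pre.length + 2 + rest3.length := by
        rw [hdecomp]; simp; omega
      have hj0 : j ≠ 0 := fun hc =>
        hpre (List.eq_nil_of_length_eq_zero (by omega))
      have hjlt : ¬ ((j : Int) + 1 = PySem.List.len rest) := by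
        rw [PySem.List.len_eq, hlenrest, ← hjlen]
        push_cast; omega
      have htyp : PySem.List.pyGetD rest ((j : Int) + 1) "" = ty := by
        rw [hdecomp, ← hjlen]
        have hc : ((pre.length : Int) + 1) = ((pre.length + 1 : Nat) : Int) := by push_cast; ring
        rw [hc, PySem.List.pyGetD_natCast]
        have hlt : pre.length + 1 < (pre ++ "-" :: ty :: rest3).length := by simp
        rw [List.getD_eq_getElem _ _ hlt]
        rw [List.getElem_append_right (by omega : pre.length ≤ pre.length + 1)]
        simp
      have hnames : PySem.List.slice rest none (some (j : Int)) = pre := by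
        rw [hdecomp, ← hjlen, PySem.List.slice_to_natCast]
        simp
      have hdrop : PySem.List.slice rest (some ((j : Int) + 2)) none = rest3 := by
        have hc : ((j : Int) + 2) = ((j + 2 : Nat) : Int) := by push_cast; ring
        rw [hc, PySem.List.slice_from_natCast, hdecomp, ← hjlen]
        simp [List.drop_append]
      have hB : pvB_loop rest out =
          pvB_loop rest3 (out.update (pre.map (fun name => (name, ty)))) := by
        rw [pvB_loop, hidx]
        simp only [if_neg hj0, if_neg hjlt, htyp, hnames, hdrop]
      rw [hA, hB]
      have hupd : out.update (pre.map (fun name => (name, ty))) =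
          pre.foldl (fun o t => o.insert t ty) out := by
        simp [PySem.Dict.update, List.foldl_map]
      rw [hupd]
      exact IH rest3.length (by omega) rest3 rfl _ (by simpa using hrest3)

-- ===== VERDICT (by name: the statement is the Claim_ definition above) =====
theorem parse_objects_typed_list_spec : Claim_equal_parse_objects_typed_list := by
  intro seq _ hpre
  unfold Spec_parse_objects_typed_list parse_objects_typed_list parse_objects_typed_list_alt
  exact pv_loops_agree seq.length seq rfl PySem.Dict.empty hpre
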